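-- pv_equiv track=rewrite | github.com/caetano-dev/graphs | graph.py | generate_grid_graph
-- ===== SOURCE A (Python) =====
-- def generate_grid_graph(p, q):
--     # Number of vertices in the graph
--     num_vertices = p * q
--
--     # Initialize an adjacency matrix with zeros
--     adjacency_matrix = [[0 for _ in range(num_vertices)] for _ in range(num_vertices)]
--
--
--     # Iterate through each vertex in the grid
--     for row in range(q):
--         for col in range(p):
--             current_node = row * p + col
--
--             # Connect to the node on the right (if it exists)
--             if col < p - 1:
--                 right_node = current_node + 1
--                 adjacency_matrix[current_node][right_node] = 1
--                 adjacency_matrix[right_node][current_node] = 1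
--
--             # Connect to the node below (if it exists)
--             if row < q - 1:
--                 bottom_node = current_node + p
--                 adjacency_matrix[current_node][bottom_node] = 1
--                 adjacency_matrix[bottom_node][current_node] = 1
--
--     return adjacency_matrix
-- ===== SOURCE B (Python) =====
-- def generate_grid_graph(p, q):
--     n = p * q
--     def adjacent(i, j):
--         return (i // p == j // p and abs(i % p - j % p) == 1) or \
--                (i % p == j % p and abs(i // p - j // p) == 1)
--     return [[1 if adjacent(i, j) else 0 for j in range(n)] for i in range(n)]
-- ===== Notes on version B (the rewrite author's own statement) =====
-- stated objective: alternative
-- what changed: replaces A's in-place mutation of a zero matrix by explicit edge insertion (two nested grid loops writing four cells per vertex) with a pure all-pairs comprehension that fills each cell from a div/mod neighbour predicate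
-- outside the precondition, e.g. on generate_grid_graph(-1, -2): A returns [[0, 0], [0, 0]], B returns [[0, 1], [1, 0]]
import Mathlib
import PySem

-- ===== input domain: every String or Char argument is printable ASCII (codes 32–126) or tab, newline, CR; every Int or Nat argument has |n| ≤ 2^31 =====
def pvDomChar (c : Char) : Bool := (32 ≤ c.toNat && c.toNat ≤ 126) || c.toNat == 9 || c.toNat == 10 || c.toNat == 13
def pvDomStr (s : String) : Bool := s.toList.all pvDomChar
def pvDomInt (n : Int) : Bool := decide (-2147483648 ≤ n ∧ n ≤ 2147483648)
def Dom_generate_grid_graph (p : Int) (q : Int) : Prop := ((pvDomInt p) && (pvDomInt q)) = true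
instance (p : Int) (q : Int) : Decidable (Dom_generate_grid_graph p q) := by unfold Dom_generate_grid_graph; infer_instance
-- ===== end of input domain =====

-- B replaces A's in-place edge-insertion loops with a pure all-pairs div/mod neighbour-predicate scan (alternative decomposition, same cost).


-- ===== PORT A =====
-- adjacency_matrix[a][b] = 1 ; everywhere A executes an assignment the indices are
-- nonnegative and in range, so .toNat with List.modify/List.set is exact there.
def pvSet1 (m : List (List Int)) (a b : Int) : List (List Int) :=
  m.modify a.toNat (fun row => row.set b.toNat 1)

def generate_grid_graph (p : Int) (q : Int) : List (List Int) :=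
  let num_vertices := p * q
  let adj0 := (PySem.List.pyRange 0 num_vertices).map
      (fun _ => (PySem.List.pyRange 0 num_vertices).map (fun _ => (0 : Int)))
  (PySem.List.pyRange 0 q).foldl (fun m row =>
    (PySem.List.pyRange 0 p).foldl (fun m col =>
      let current := row * p + col
      let m1 := if col < p - 1 then pvSet1 (pvSet1 m current (current + 1)) (current + 1) current else m
      if row < q - 1 then pvSet1 (pvSet1 m1 current (current + p)) (current + p) current else m1) m) adj0

-- ===== PORT B =====
-- abs(x) == 1 on ints is ported as x.natAbs == 1 (exact).
def pvAdjacent (p i j : Int) : Bool :=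
  (PySem.Int.floordiv i p == PySem.Int.floordiv j p
      && (PySem.Int.mod i p - PySem.Int.mod j p).natAbs == 1)
  || (PySem.Int.mod i p == PySem.Int.mod j p
      && (PySem.Int.floordiv i p - PySem.Int.floordiv j p).natAbs == 1)

def generate_grid_graph_alt (p : Int) (q : Int) : List (List Int) :=
  let n := p * q
  (PySem.List.pyRange 0 n).map (fun i =>
    (PySem.List.pyRange 0 n).map (fun j => if pvAdjacent p i j then (1 : Int) else 0))

-- ===== PRECONDITION & SPEC =====
-- Pre_ excludes only p < 0 ∧ q < 0, where p*q > 0 and A returns an all-zero pq×pq matrix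
-- only because its (empty) grid loops never ran — an accident of negative dimensions.
def Pre_generate_grid_graph (p : Int) (q : Int) : Prop := 0 ≤ p ∨ 0 ≤ q
instance (p : Int) (q : Int) : Decidable (Pre_generate_grid_graph p q) := by
  unfold Pre_generate_grid_graph; infer_instance

def pvWitness_generate_grid_graph : Int × Int := (3, 2)

def Spec_generate_grid_graph (p : Int) (q : Int) (out : List (List Int)) : Prop := out = generate_grid_graph_alt p q
instance (p : Int) (q : Int) (out : List (List Int)) : Decidable (Spec_generate_grid_graph p q out) := by unfold Spec_generate_grid_graph; infer_instance

-- ===== CLAIM (what is proved, stated in full; the proofs are below) =====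
def Claim_equal_generate_grid_graph : Prop := ∀ (p : Int) (q : Int), Dom_generate_grid_graph p q → Pre_generate_grid_graph p q → Spec_generate_grid_graph p q (generate_grid_graph p q)

-- ===== LEMMAS AND PROOFS =====

-- the (i,j) cell of a matrix, defaulting out of range
def pvEntry (m : List (List Int)) (i j : Nat) : Int := (m.getD i []).getD j 0

def pvStep (m : List (List Int)) (e : Int × Int) : List (List Int) := pvSet1 m e.1 e.2

-- the writes one grid vertex performs, as an edge list
def pvContrib (p q row col : Int) : List (Int × Int) :=
  (if col < p - 1 then [(row * p + col, row * p + col + 1), (row * p + col + 1, row * p + col)] else [])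
  ++ (if row < q - 1 then [(row * p + col, row * p + col + p), (row * p + col + p, row * p + col)] else [])

def pvZeros (p q : Int) : List (List Int) :=
  (PySem.List.pyRange 0 (p*q)).map (fun _ => (PySem.List.pyRange 0 (p*q)).map (fun _ => (0 : Int)))

def pvEdges (p q : Int) : List (Int × Int) :=
  (PySem.List.pyRange 0 q).flatMap (fun row => (PySem.List.pyRange 0 p).flatMap (fun col => pvContrib p q row col))

lemma pvRange_nil (n : Int) (h : n ≤ 0) : PySem.List.pyRange 0 n = [] := by
  simp [PySem.List.pyRange]
  omega

lemma pvSet1_nil (a b : Int) : pvSet1 [] a b = [] := by simp [pvSet1]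

lemma foldl_keeps_nil {α β : Type} (f : List β → α → List β) (h : ∀ x, f [] x = []) (l : List α) :
    l.foldl f [] = [] := by
  induction l with
  | nil => rfl
  | cons x xs ih => simp [List.foldl, h x, ih]

lemma pvSet1_length (m : List (List Int)) (a b : Int) : (pvSet1 m a b).length = m.length := by
  simp [pvSet1]

lemma pvSet1_rowlen (m : List (List Int)) (a b : Int) (k : Nat) :
    ((pvSet1 m a b).getD k []).length = (m.getD k []).length := by
  simp only [pvSet1, List.getD, List.getElem?_modify]
  cases m[k]? with
  | none => simp
  | some row => simp only [Option.getD_some]; split <;> simp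

lemma entry_pvSet1 (m : List (List Int)) (a b : Int) (i j : Nat) :
    pvEntry (pvSet1 m a b) i j =
      if a.toNat = i ∧ b.toNat = j ∧ i < m.length ∧ j < (m.getD i []).length then 1
      else pvEntry m i j := by
  simp only [pvEntry, pvSet1, List.getD, List.getElem?_modify]
  cases h : m[i]? with
  | none =>
      have hi : ¬ i < m.length := by simpa [List.getElem?_eq_none_iff] using h
      simp [hi]
  | some row =>
      have hi : i < m.length := by
        have := List.getElem?_eq_some_iff.mp h
        exact this.1
      simp only [Option.getD_some]
      by_cases ha : a.toNat = i
      · subst ha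
        simp only [if_pos rfl]
        by_cases hb : b.toNat = j
        · subst hb
          by_cases hj : b.toNat < row.length
          · simp [hi, hj, List.getElem_set_self, List.length_set, h]
          · simp [hi, hj, h, List.getD, List.getElem?_set]
        · simp [hi, hb, h, List.getD, List.getElem?_set, Ne.symm hb]
      · simp [ha, h]

lemma foldl_pvStep_length (E : List (Int × Int)) (m : List (List Int)) :
    (E.foldl pvStep m).length = m.length := by
  induction E generalizing m with
  | nil => rfl
  | cons e E ih => simp [List.foldl, pvStep, ih, pvSet1_length]

lemma foldl_pvStep_rowlen (E : List (Int × Int)) (m : List (List Int)) (k : Nat) :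
    ((E.foldl pvStep m).getD k []).length = (m.getD k []).length := by
  induction E generalizing m with
  | nil => rfl
  | cons e E ih => rw [List.foldl_cons, ih]; exact pvSet1_rowlen m e.1 e.2 k

lemma entry_foldl_pvStep (E : List (Int × Int)) (m : List (List Int)) (i j : Nat) :
    pvEntry (E.foldl pvStep m) i j =
      if ∃ e ∈ E, e.1.toNat = i ∧ e.2.toNat = j ∧ i < m.length ∧ j < (m.getD i []).length then 1
      else pvEntry m i j := by
  induction E generalizing m with
  | nil => simp
  | cons e E ih =>
      rw [List.foldl_cons, ih]
      have hl : (pvStep m e).length = m.length := pvSet1_length m e.1 e.2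
      have hr : ((pvStep m e).getD i []).length = (m.getD i []).length := pvSet1_rowlen m e.1 e.2 i
      rw [hl, hr]
      have hent : pvEntry (pvStep m e) i j =
          if e.1.toNat = i ∧ e.2.toNat = j ∧ i < m.length ∧ j < (m.getD i []).length then 1
          else pvEntry m i j := entry_pvSet1 m e.1 e.2 i j
      rw [hent]
      by_cases hB : ∃ x ∈ E, x.1.toNat = i ∧ x.2.toNat = j ∧ i < m.length ∧ j < (m.getD i []).length
      · rw [if_pos hB, if_pos]
        obtain ⟨x, hx, hc⟩ := hB
        exact ⟨x, List.mem_cons_of_mem _ hx, hc⟩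
      · rw [if_neg hB]
        by_cases hA : e.1.toNat = i ∧ e.2.toNat = j ∧ i < m.length ∧ j < (m.getD i []).length
        · rw [if_pos hA, if_pos ⟨e, List.mem_cons_self, hA⟩]
        · rw [if_neg hA, if_neg]
          rintro ⟨x, hx, hc⟩
          rcases List.mem_cons.mp hx with rfl | hx'
          · exact hA hc
          · exact hB ⟨x, hx', hc⟩

lemma gg_eq_fold (p q : Int) : generate_grid_graph p q = (pvEdges p q).foldl pvStep (pvZeros p q) := by
  unfold generate_grid_graph pvEdges pvZeros
  simp only [List.foldl_flatMap]
  congr 1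
  funext m row
  congr 1
  funext m' col
  simp only [pvContrib]
  split_ifs <;> simp [pvStep, List.foldl]

lemma mem_edges_iff (P Q : Nat) (e : Int × Int) :
    e ∈ pvEdges (↑P) (↑Q) ↔ ∃ r < Q, ∃ c < P,
      (c + 1 < P ∧ (e = (↑(r*P+c), ↑(r*P+c+1)) ∨ e = (↑(r*P+c+1), ↑(r*P+c)))) ∨
      (r + 1 < Q ∧ (e = (↑(r*P+c), ↑(r*P+c+P)) ∨ e = (↑(r*P+c+P), ↑(r*P+c)))) := by
  simp only [pvEdges, List.mem_flatMap, PySem.List.pyRange_zero_natCast, List.mem_map,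
    List.mem_range, pvContrib, List.mem_append]
  constructor
  · rintro ⟨row, ⟨r, hr, rfl⟩, col, ⟨c, hc, rfl⟩, h⟩
    refine ⟨r, hr, c, hc, ?_⟩
    rcases h with h | h
    · split_ifs at h with hcond
      · left
        refine ⟨by exact_mod_cast (by omega : (c : Int) + 1 < P), ?_⟩
        simp at h
        rcases h with h | h <;> [left; right] <;> (rw [h]; push_cast; constructor <;> ring)
      · simp at h
    · split_ifs at h with hcond
      · right
        refine ⟨by exact_mod_cast (by omega : (r : Int) + 1 < Q), ?_⟩
        simp at h
        rcases h with h | h <;> [left; right] <;> (rw [h]; push_cast; constructor <;> ring)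
      · simp at h
  · rintro ⟨r, hr, c, hc, h⟩
    refine ⟨r, ⟨r, hr, rfl⟩, c, ⟨c, hc, rfl⟩, ?_⟩
    rcases h with ⟨hcp, h⟩ | ⟨hrq, h⟩
    · left
      rw [if_pos (show (c:Int) < (P:Int) - 1 by omega)]
      simp only [List.mem_cons, List.not_mem_nil, or_false, Prod.mk.injEq]
      rcases h with rfl | rfl
      · left; constructor <;> (push_cast; ring)
      · right; constructor <;> (push_cast; ring)
    · right
      rw [if_pos (show (r:Int) < (Q:Int) - 1 by omega)]
      simp only [List.mem_cons, List.not_mem_nil, or_false, Prod.mk.injEq]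
      rcases h with rfl | rfl
      · left; constructor <;> (push_cast; ring)
      · right; constructor <;> (push_cast; ring)

lemma adjacent_nat (P i j : Nat) :
    pvAdjacent (↑P) (↑i) (↑j) = true ↔
      ((i / P = j / P ∧ (i % P = j % P + 1 ∨ j % P = i % P + 1)) ∨
       (i % P = j % P ∧ (i / P = j / P + 1 ∨ j / P = i / P + 1))) := by
  simp only [pvAdjacent, PySem.Int.floordiv_natCast, PySem.Int.mod_natCast,
    Bool.or_eq_true, Bool.and_eq_true, beq_iff_eq, Nat.cast_inj]
  constructor
  · rintro (⟨h1, h2⟩ | ⟨h1, h2⟩)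
    · exact Or.inl ⟨h1, by omega⟩
    · exact Or.inr ⟨h1, by omega⟩
  · rintro (⟨h1, h2⟩ | ⟨h1, h2⟩)
    · exact Or.inl ⟨h1, by omega⟩
    · exact Or.inr ⟨h1, by omega⟩

lemma pvdm (P : Nat) (hP : 0 < P) : ∀ r k, k < P → (r * P + k) / P = r ∧ (r * P + k) % P = k := by
  intro r k hk
  rw [Nat.mul_comm r P]
  constructor
  · rw [Nat.mul_add_div hP, Nat.div_eq_of_lt hk]
    omega
  · rw [Nat.mul_add_mod, Nat.mod_eq_of_lt hk]

lemma grid_adj (P Q i j : Nat) (hP : 0 < P) (hi : i < P * Q) (hj : j < P * Q) :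
    (∃ r < Q, ∃ c < P,
      (c + 1 < P ∧ ((i = r*P+c ∧ j = r*P+c+1) ∨ (i = r*P+c+1 ∧ j = r*P+c))) ∨
      (r + 1 < Q ∧ ((i = r*P+c ∧ j = r*P+c+P) ∨ (i = r*P+c+P ∧ j = r*P+c)))) ↔
    ((i / P = j / P ∧ (i % P = j % P + 1 ∨ j % P = i % P + 1)) ∨
     (i % P = j % P ∧ (i / P = j / P + 1 ∨ j / P = i / P + 1))) := by
  have hdi := Nat.div_add_mod i P
  have hdj := Nat.div_add_mod j P
  have hmi := Nat.mod_lt i hP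
  have hmj := Nat.mod_lt j hP
  have hqi : i / P < Q := Nat.div_lt_iff_lt_mul hP |>.mpr (by rw [Nat.mul_comm Q P]; exact hi)
  have hqj : j / P < Q := Nat.div_lt_iff_lt_mul hP |>.mpr (by rw [Nat.mul_comm Q P]; exact hj)
  have dm := pvdm P hP
  have ci : i/P*P = P*(i/P) := Nat.mul_comm _ _
  have cj : j/P*P = P*(j/P) := Nat.mul_comm _ _
  constructor
  · rintro ⟨r, hr, c, hc, ⟨hcp, ⟨rfl, rfl⟩ | ⟨rfl, rfl⟩⟩ | ⟨hrq, ⟨rfl, rfl⟩ | ⟨rfl, rfl⟩⟩⟩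
    · rw [show r*P+c+1 = r*P+(c+1) by omega, (dm r c hc).1, (dm r (c+1) hcp).1,
        (dm r c hc).2, (dm r (c+1) hcp).2]
      exact Or.inl ⟨rfl, Or.inr rfl⟩
    · rw [show r*P+c+1 = r*P+(c+1) by omega, (dm r c hc).1, (dm r (c+1) hcp).1,
        (dm r c hc).2, (dm r (c+1) hcp).2]
      exact Or.inl ⟨rfl, Or.inl rfl⟩
    · rw [show r*P+c+P = (r+1)*P+c by ring, (dm r c hc).1, (dm (r+1) c hc).1,
        (dm r c hc).2, (dm (r+1) c hc).2]
      exact Or.inr ⟨rfl, Or.inr rfl⟩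
    · rw [show r*P+c+P = (r+1)*P+c by ring, (dm r c hc).1, (dm (r+1) c hc).1,
        (dm r c hc).2, (dm (r+1) c hc).2]
      exact Or.inr ⟨rfl, Or.inl rfl⟩
  · rintro (⟨h1, h2 | h2⟩ | ⟨h1, h2 | h2⟩)
    · have hpp : i/P*P = j/P*P := by rw [h1]
      exact ⟨j / P, hqj, j % P, by omega, Or.inl ⟨by omega, Or.inr ⟨by omega, by omega⟩⟩⟩
    · have hpp : j/P*P = i/P*P := by rw [h1]
      exact ⟨i / P, hqi, i % P, by omega, Or.inl ⟨by omega, Or.inl ⟨by omega, by omega⟩⟩⟩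
    · have hpp : i/P*P = j/P*P + P := by rw [h2, Nat.add_mul, Nat.one_mul]
      exact ⟨j / P, hqj, j % P, by omega, Or.inr ⟨by omega, Or.inr ⟨by omega, by omega⟩⟩⟩
    · have hpp : j/P*P = i/P*P + P := by rw [h2, Nat.add_mul, Nat.one_mul]
      exact ⟨i / P, hqi, i % P, by omega, Or.inr ⟨by omega, Or.inl ⟨by omega, by omega⟩⟩⟩

lemma pvCast_mul (P Q : Nat) : ((P:Int) * (Q:Int)) = ((P*Q : Nat) : Int) := by push_cast; ring

lemma zeros_eq (P Q : Nat) : pvZeros ↑P ↑Q =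
    List.replicate (P*Q) (List.replicate (P*Q) (0:Int)) := by
  unfold pvZeros
  rw [pvCast_mul, PySem.List.pyRange_zero_natCast]
  simp [List.map_map, Function.comp_def]

lemma alt_eq (P Q : Nat) : generate_grid_graph_alt ↑P ↑Q =
    (List.range (P*Q)).map (fun (i : Nat) => (List.range (P*Q)).map (fun (j : Nat) => if pvAdjacent (↑P) (↑i) (↑j) then (1:Int) else 0)) := by
  simp only [generate_grid_graph_alt, pvCast_mul, PySem.List.pyRange_zero_natCast,
    List.map_map, Function.comp_def]

lemma zeros_len (P Q : Nat) : (pvZeros ↑P ↑Q).length = P*Q := by simp [zeros_eq]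

lemma zeros_rowlen (P Q k : Nat) (hk : k < P*Q) : ((pvZeros ↑P ↑Q).getD k []).length = P*Q := by
  rw [zeros_eq, List.getD_eq_getElem _ _ (by simpa using hk)]
  simp

lemma getD_zero_row (n j : Nat) : (List.replicate n (0:Int)).getD j 0 = 0 := by
  rcases lt_or_ge j n with h | h
  · rw [List.getD_eq_getElem _ _ (by simpa using h)]
    simp
  · rw [List.getD_eq_default _ _ (by simpa using h)]

lemma zeros_entry (P Q i j : Nat) : pvEntry (pvZeros ↑P ↑Q) i j = 0 := by
  unfold pvEntry
  rw [zeros_eq]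
  rcases lt_or_ge i (P*Q) with h | h
  · have hrow : (List.replicate (P*Q) (List.replicate (P*Q) (0:Int))).getD i [] = List.replicate (P*Q) 0 := by
      rw [List.getD_eq_getElem _ _ (by simpa using h)]
      simp
    rw [hrow, getD_zero_row]
  · have hrow : (List.replicate (P*Q) (List.replicate (P*Q) (0:Int))).getD i [] = [] := by
      rw [List.getD_eq_default _ _ (by simpa using h)]
    rw [hrow]
    rfl

lemma main_nat (P Q : Nat) (hP : 0 < P) : generate_grid_graph ↑P ↑Q = generate_grid_graph_alt ↑P ↑Q := by
  rw [gg_eq_fold, alt_eq]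
  have hlen : (List.foldl pvStep (pvZeros ↑P ↑Q) (pvEdges ↑P ↑Q)).length = P*Q := by
    rw [foldl_pvStep_length, zeros_len]
  apply List.ext_getElem
  · rw [hlen]; simp
  · intro i h1 h2
    have hi : i < P*Q := by rw [hlen] at h1; exact h1
    have hrowlen : ((List.foldl pvStep (pvZeros ↑P ↑Q) (pvEdges ↑P ↑Q)).getD i []).length = P*Q := by
      rw [foldl_pvStep_rowlen, zeros_rowlen P Q i hi]
    apply List.ext_getElem
    · rw [← List.getD_eq_getElem _ [] h1, hrowlen]
      simp
    · intro j hj1 hj2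
      have hj : j < P*Q := by
        rw [← List.getD_eq_getElem _ [] h1, hrowlen] at hj1
        exact hj1
      have hLHS : (List.foldl pvStep (pvZeros ↑P ↑Q) (pvEdges ↑P ↑Q))[i][j] =
          pvEntry (List.foldl pvStep (pvZeros ↑P ↑Q) (pvEdges ↑P ↑Q)) i j := by
        unfold pvEntry
        rw [List.getD_eq_getElem _ [] h1, List.getD_eq_getElem _ 0 hj1]
      rw [hLHS, entry_foldl_pvStep, zeros_entry]
      have hRHS : ((List.range (P*Q)).map (fun (i : Nat) => (List.range (P*Q)).map
            (fun (j : Nat) => if pvAdjacent (↑P) (↑i) (↑j) then (1:Int) else 0)))[i][j]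
          = (if pvAdjacent (↑P) (↑i) (↑j) then (1:Int) else 0) := by
        simp
      rw [hRHS]
      have hEx : (∃ e ∈ pvEdges (↑P:Int) (↑Q:Int), e.1.toNat = i ∧ e.2.toNat = j) ↔
          (∃ r < Q, ∃ c < P,
            (c + 1 < P ∧ ((i = r*P+c ∧ j = r*P+c+1) ∨ (i = r*P+c+1 ∧ j = r*P+c))) ∨
            (r + 1 < Q ∧ ((i = r*P+c ∧ j = r*P+c+P) ∨ (i = r*P+c+P ∧ j = r*P+c)))) := by
        constructor
        · rintro ⟨e, he, h1', h2'⟩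
          obtain ⟨r, hr, c, hc, hcase⟩ := (mem_edges_iff P Q e).mp he
          refine ⟨r, hr, c, hc, ?_⟩
          rcases hcase with ⟨h3, rfl | rfl⟩ | ⟨h3, rfl | rfl⟩ <;> simp at h1' h2'
          · exact Or.inl ⟨h3, Or.inl ⟨h1'.symm, h2'.symm⟩⟩
          · exact Or.inl ⟨h3, Or.inr ⟨h1'.symm, h2'.symm⟩⟩
          · exact Or.inr ⟨h3, Or.inl ⟨h1'.symm, h2'.symm⟩⟩
          · exact Or.inr ⟨h3, Or.inr ⟨h1'.symm, h2'.symm⟩⟩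
        · rintro ⟨r, hr, c, hc, ⟨h3, ⟨rfl, rfl⟩ | ⟨rfl, rfl⟩⟩ | ⟨h3, ⟨rfl, rfl⟩ | ⟨rfl, rfl⟩⟩⟩
          · exact ⟨(↑(r*P+c), ↑(r*P+c+1)),
              (mem_edges_iff P Q _).mpr ⟨r, hr, c, hc, Or.inl ⟨h3, Or.inl rfl⟩⟩, by exact Int.toNat_natCast _, by exact Int.toNat_natCast _⟩
          · exact ⟨(↑(r*P+c+1), ↑(r*P+c)),
              (mem_edges_iff P Q _).mpr ⟨r, hr, c, hc, Or.inl ⟨h3, Or.inr rfl⟩⟩, by exact Int.toNat_natCast _, by exact Int.toNat_natCast _⟩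
          · exact ⟨(↑(r*P+c), ↑(r*P+c+P)),
              (mem_edges_iff P Q _).mpr ⟨r, hr, c, hc, Or.inr ⟨h3, Or.inl rfl⟩⟩, by exact Int.toNat_natCast _, by exact Int.toNat_natCast _⟩
          · exact ⟨(↑(r*P+c+P), ↑(r*P+c)),
              (mem_edges_iff P Q _).mpr ⟨r, hr, c, hc, Or.inr ⟨h3, Or.inr rfl⟩⟩, by exact Int.toNat_natCast _, by exact Int.toNat_natCast _⟩
      have hcond : (∃ e ∈ pvEdges (↑P:Int) (↑Q:Int), e.1.toNat = i ∧ e.2.toNat = j ∧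
          i < (pvZeros (↑P:Int) (↑Q:Int)).length ∧ j < ((pvZeros (↑P:Int) (↑Q:Int)).getD i []).length) ↔
          pvAdjacent (↑P) (↑i) (↑j) = true := by
        simp only [zeros_len, zeros_rowlen P Q i hi, hi, hj, and_true]
        exact hEx.trans ((grid_adj P Q i j hP hi hj).trans (adjacent_nat P i j).symm)
      by_cases hadj : pvAdjacent (↑P:Int) (↑i:Int) (↑j:Int) = true
      · rw [if_pos (hcond.mpr hadj), if_pos hadj]
      · rw [if_neg (fun hmem => hadj (hcond.mp hmem)), if_neg hadj]

-- ===== VERDICT (by name: the statement is the Claim_ definition above) =====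
theorem generate_grid_graph_spec : Claim_equal_generate_grid_graph := by
  intro p q _ hpre
  unfold Spec_generate_grid_graph
  by_cases hpos : 0 < p ∧ 0 < q
  · obtain ⟨hp, hq⟩ := hpos
    obtain ⟨P, rfl⟩ : ∃ P : Nat, (↑P : Int) = p := ⟨p.toNat, Int.toNat_of_nonneg hp.le⟩
    obtain ⟨Q, rfl⟩ : ∃ Q : Nat, (↑Q : Int) = q := ⟨q.toNat, Int.toNat_of_nonneg hq.le⟩
    exact main_nat P Q (by exact_mod_cast hp)
  · have hn : p * q ≤ 0 := by
      rcases hpre with h | h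
      · rcases (by omega : p = 0 ∨ 0 < p) with rfl | hp
        · simp
        · have hq : q ≤ 0 := by omega
          exact mul_nonpos_of_nonneg_of_nonpos hp.le hq
      · rcases (by omega : q = 0 ∨ 0 < q) with rfl | hq
        · simp
        · have hp : p ≤ 0 := by omega
          exact mul_nonpos_of_nonpos_of_nonneg hp hq.le
    have hz : pvZeros p q = [] := by
      unfold pvZeros
      rw [pvRange_nil _ hn]
      rfl
    rw [gg_eq_fold, hz, foldl_keeps_nil pvStep (fun e => pvSet1_nil e.1 e.2)]
    simp [generate_grid_graph_alt, pvRange_nil _ hn]
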